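-- pv_equiv track=rewrite | github.com/arnabclir/quotation_comparison_service | app.py | get_supplier_unique_sku_counts
-- ===== SOURCE A (Python) =====
-- def get_supplier_unique_sku_counts(all_processed_items):
--     supplier_skus = {}
--     for item in all_processed_items:
--         supplier = item["supplier"]
--         sku = item["sku"] # Using raw SKU
--         if supplier not in supplier_skus:
--             supplier_skus[supplier] = set()
--         supplier_skus[supplier].add(sku)
--     return {supplier: len(skus) for supplier, skus in supplier_skus.items()}
-- ===== SOURCE B (Python) =====
-- def get_supplier_unique_sku_counts(all_processed_items):
--     # one global ordered-dedup of (supplier, sku) pairs, then a counting pass per supplier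
--     pairs = dict.fromkeys((item["supplier"], item["sku"]) for item in all_processed_items)
--     counts = {}
--     for supplier, _sku in pairs:
--         counts[supplier] = counts.get(supplier, 0) + 1
--     return counts
-- ===== Notes on version B (the rewrite author's own statement) =====
-- stated objective: alternative
-- what changed: B dedupes (supplier, sku) pairs globally in one ordered pass (dict.fromkeys) and then tallies suppliers with a counting dict, instead of A's incrementally maintained dict of per-supplier sku sets.
import Mathlib
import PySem

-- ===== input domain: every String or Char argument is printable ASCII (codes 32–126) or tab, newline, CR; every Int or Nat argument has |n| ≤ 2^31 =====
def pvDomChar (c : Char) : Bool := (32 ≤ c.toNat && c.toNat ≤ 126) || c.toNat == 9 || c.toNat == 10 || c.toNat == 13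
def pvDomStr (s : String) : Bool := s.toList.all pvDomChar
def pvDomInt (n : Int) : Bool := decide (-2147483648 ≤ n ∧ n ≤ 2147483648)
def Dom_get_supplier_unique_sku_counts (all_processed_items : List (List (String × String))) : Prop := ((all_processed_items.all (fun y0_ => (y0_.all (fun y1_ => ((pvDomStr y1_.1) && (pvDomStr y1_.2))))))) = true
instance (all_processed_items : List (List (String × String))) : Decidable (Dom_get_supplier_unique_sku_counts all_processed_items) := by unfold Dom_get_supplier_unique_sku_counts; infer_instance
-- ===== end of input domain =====

-- B replaces A's incrementally-maintained per-supplier sku-sets by one global ordered dedup of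
-- (supplier, sku) pairs followed by a counting pass (objective: alternative decomposition, same cost).

-- shared helper: Python's item["k"] dict access; total here, Pre_ guarantees the key is present
def pvItemGet (item : List (String × String)) (k : String) : String :=
  PySem.Dict.getD (PySem.Dict.mk item) k ""

-- ===== PORT A =====
def get_supplier_unique_sku_counts (all_processed_items : List (List (String × String))) : List (String × Int) :=
  let supplier_skus : PySem.Dict String (PySem.Set String) :=
    all_processed_items.foldl (fun d item =>
      let supplier := pvItemGet item "supplier"
      let sku := pvItemGet item "sku"
      let d := if d.contains supplier then d else d.insert supplier PySem.Set.empty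
      d.insert supplier (PySem.Set.add (d.getD supplier PySem.Set.empty) sku)) PySem.Dict.empty
  supplier_skus.items.map (fun p => (p.1, PySem.Set.len p.2))

-- ===== PORT B =====
def get_supplier_unique_sku_counts_alt (all_processed_items : List (List (String × String))) : List (String × Int) :=
  let pairs : PySem.Set (String × String) :=
    PySem.List.dedup (all_processed_items.map (fun item => (pvItemGet item "supplier", pvItemGet item "sku")))
  let counts : PySem.Dict String Int :=
    pairs.foldl (fun d p => d.insert p.1 (d.getD p.1 0 + 1)) PySem.Dict.empty
  counts.items

-- ===== PRECONDITION & SPEC =====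
-- Pre_: every item carries both keys "supplier" and "sku" — exactly where Python A returns (else KeyError)
def Pre_get_supplier_unique_sku_counts (all_processed_items : List (List (String × String))) : Prop :=
  (all_processed_items.all (fun item =>
    (PySem.Dict.mk item).contains "supplier" && (PySem.Dict.mk item).contains "sku")) = true
instance (all_processed_items : List (List (String × String))) : Decidable (Pre_get_supplier_unique_sku_counts all_processed_items) := by unfold Pre_get_supplier_unique_sku_counts; infer_instance

def pvWitness_get_supplier_unique_sku_counts : (List (List (String × String))) :=
  [[("supplier", "s1"), ("sku", "a")], [("supplier", "s1"), ("sku", "b")],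
   [("supplier", "s2"), ("sku", "a")], [("supplier", "s1"), ("sku", "a")]]

def Spec_get_supplier_unique_sku_counts (all_processed_items : List (List (String × String))) (out : List (String × Int)) : Prop := out = get_supplier_unique_sku_counts_alt all_processed_items
instance (all_processed_items : List (List (String × String))) (out : List (String × Int)) : Decidable (Spec_get_supplier_unique_sku_counts all_processed_items out) := by unfold Spec_get_supplier_unique_sku_counts; infer_instance

-- ===== CLAIM (what is proved, stated in full; the proofs are below) =====
def Claim_equal_get_supplier_unique_sku_counts : Prop := ∀ (all_processed_items : List (List (String × String))), Dom_get_supplier_unique_sku_counts all_processed_items → Pre_get_supplier_unique_sku_counts all_processed_items → Spec_get_supplier_unique_sku_counts all_processed_items (get_supplier_unique_sku_counts all_processed_items)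

-- ===== LEMMAS AND PROOFS =====

-- A's loop body is Dict.modify
theorem pvStepA (d : PySem.Dict String (PySem.Set String)) (sup sku : String) :
    (let d' := if d.contains sup then d else d.insert sup PySem.Set.empty
     d'.insert sup (PySem.Set.add (d'.getD sup PySem.Set.empty) sku))
      = d.modify sup PySem.Set.empty (fun s => s.add sku) := by
  by_cases h : d.contains sup
  · simp [h, PySem.Dict.modify]
  · simp only [eq_false_of_ne_true h, Bool.false_eq_true, if_false]
    rw [PySem.Dict.getD_insert_self, PySem.Dict.insert_insert_self, PySem.Dict.modify,
      PySem.Dict.getD_of_not_contains d PySem.Set.empty (eq_false_of_ne_true h)]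

-- the skus accumulated for key k are the ordered-distinct skus of the pairs with first component k
theorem pvGetDGroup (l : List (String × String)) (d : PySem.Dict String (PySem.Set String)) (k : String) :
    (l.foldl (fun d p => d.modify p.1 PySem.Set.empty (fun s => s.add p.2)) d).getD k PySem.Set.empty
      = PySem.Set.update (d.getD k PySem.Set.empty) ((l.filter (fun p => p.1 == k)).map (·.2)) := by
  induction l generalizing d with
  | nil => simp [PySem.Set.update_nil]
  | cons p l ih =>
    rw [List.foldl_cons, ih, List.filter_cons, PySem.Dict.getD_modify]
    by_cases h : p.1 = k
    · simp [h, PySem.Set.update_cons]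
    · rw [if_neg (fun hh => h hh.symm)]
      simp [h]

-- ordered dedup commutes with mapping before dedup-ing again
theorem pvOfListMapOfList (l : List (String × String)) (f : String × String → String) :
    PySem.Set.ofList ((PySem.Set.ofList l).map f) = PySem.Set.ofList (l.map f) := by
  induction l using List.reverseRecOn with
  | nil => simp [PySem.Set.ofList_nil]
  | append_singleton l x ih =>
    rw [List.map_append, List.map_singleton, PySem.Set.ofList_append_singleton,
      PySem.Set.ofList_append_singleton, PySem.Set.add_eq_ite]
    by_cases h : x ∈ PySem.Set.ofList l
    · rw [if_pos h, ih, PySem.Set.add_of_mem]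
      exact (PySem.Set.mem_ofList _ _).2 (List.mem_map_of_mem ((PySem.Set.mem_ofList _ _).1 h))
    · rw [if_neg h, List.map_append, List.map_singleton, PySem.Set.ofList_append_singleton, ih]

-- counting a supplier among the deduped pairs = number of its distinct skus
theorem pvCountPairs (l : List (String × String)) (k : String) :
    List.countP (fun p => p.1 == k) (PySem.Set.ofList l)
      = (PySem.Set.ofList ((l.filter (fun p => p.1 == k)).map (·.2))).length := by
  induction l using List.reverseRecOn with
  | nil => simp [PySem.Set.ofList_nil]
  | append_singleton l x ih =>
    rw [PySem.Set.ofList_append_singleton, PySem.Set.add_eq_ite, List.filter_append,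
      List.filter_cons]
    by_cases hk : x.1 = k
    · simp only [hk, beq_self_eq_true, if_true, List.filter_nil, List.map_append,
        List.map_singleton, PySem.Set.ofList_append_singleton, PySem.Set.add_eq_ite]
      by_cases hm : x ∈ PySem.Set.ofList l
      · have hx : x ∈ l := (PySem.Set.mem_ofList _ _).1 hm
        have h2 : x.2 ∈ (l.filter (fun p => p.1 == k)).map (·.2) := by
          exact List.mem_map_of_mem (List.mem_filter.2 ⟨hx, by simp [hk]⟩)
        rw [if_pos hm, ih, if_pos ((PySem.Set.mem_ofList _ _).2 h2)]
      · have h2 : x.2 ∉ (l.filter (fun p => p.1 == k)).map (·.2) := by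
          intro hmem
          rcases List.mem_map.1 hmem with ⟨q, hq, hq2⟩
          rcases List.mem_filter.1 hq with ⟨hql, hqk⟩
          have : q = x := by
            rcases q with ⟨q1, q2⟩; rcases x with ⟨x1, x2⟩
            simp only [beq_iff_eq] at hqk
            simp_all
          exact hm ((PySem.Set.mem_ofList _ _).2 (this ▸ hql))
        rw [if_neg hm, List.countP_append, ih, if_neg fun hc => h2 ((PySem.Set.mem_ofList _ _).1 hc)]
        simp [hk]
    · have hk' : (x.1 == k) = false := by simp [hk]
      simp only [hk', Bool.false_eq_true, if_false, List.filter_nil, List.append_nil]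
      by_cases hm : x ∈ PySem.Set.ofList l
      · rw [if_pos hm, ih]
      · rw [if_neg hm, List.countP_append, ih]
        simp [hk']

-- ===== VERDICT (by name: the statement is the Claim_ definition above) =====
theorem get_supplier_unique_sku_counts_spec : Claim_equal_get_supplier_unique_sku_counts := by
  intro xs _ _
  unfold Spec_get_supplier_unique_sku_counts get_supplier_unique_sku_counts get_supplier_unique_sku_counts_alt
  simp only []
  set l := xs.map (fun item => (pvItemGet item "supplier", pvItemGet item "sku")) with hl
  -- rewrite A's fold into the modify form over l
  have hfold :
      xs.foldl (fun d item =>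
        let supplier := pvItemGet item "supplier"
        let sku := pvItemGet item "sku"
        let d := if d.contains supplier then d else d.insert supplier PySem.Set.empty
        d.insert supplier (PySem.Set.add (d.getD supplier PySem.Set.empty) sku)) PySem.Dict.empty
      = l.foldl (fun d p => d.modify p.1 PySem.Set.empty (fun s => s.add p.2)) PySem.Dict.empty := by
    rw [hl, List.foldl_map]
    congr 1
    funext d it
    exact pvStepA d (pvItemGet it "supplier") (pvItemGet it "sku")
  rw [hfold]
  -- rewrite B's fold into a counter over the suppliers of the deduped pairs
  have hcnt :
      (PySem.List.dedup l).foldl (fun d p => d.insert p.1 (d.getD p.1 0 + 1)) PySem.Dict.empty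
      = PySem.Dict.counter ((PySem.List.dedup l).map (·.1)) := by
    rw [← PySem.Dict.foldl_insert_getD_add_one_eq_counter, List.foldl_map]
  rw [hcnt, PySem.Dict.items_counter, PySem.List.dedup_eq_ofList, pvOfListMapOfList]
  -- A's side: items of the grouping fold
  set g := (fun (d : PySem.Dict String (PySem.Set String)) (p : String × String) =>
    d.modify p.1 PySem.Set.empty (fun s => s.add p.2)) with hg
  have hnodup : (l.foldl g PySem.Dict.empty).keys.Nodup := by
    rw [hg]
    exact PySem.Dict.nodup_keys_foldl_modify_key l (·.1) PySem.Set.empty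
      (fun _ p s => s.add p.2) PySem.Dict.empty (by simp [PySem.Dict.keys_empty])
  have hkeys : (l.foldl g PySem.Dict.empty).keys = PySem.Set.ofList (l.map (·.1)) := by
    rw [hg]
    rw [PySem.Dict.keys_foldl_modify_key l (·.1) PySem.Set.empty (fun _ p s => s.add p.2)
      PySem.Dict.empty, PySem.Dict.keys_empty, PySem.Set.update_nil_left]
  rw [PySem.Dict.items_eq_map_keys _ hnodup PySem.Set.empty, hkeys, List.map_map]
  refine List.map_congr_left (fun k _ => ?_)
  simp only [Function.comp]
  have hget := pvGetDGroup l PySem.Dict.empty k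
  rw [PySem.Dict.getD_empty] at hget
  rw [hg] at *
  rw [hget, PySem.Set.empty_eq, PySem.Set.update_nil_left, PySem.Set.len_eq]
  have : List.count k ((PySem.Set.ofList l).map (·.1))
      = List.countP (fun p => p.1 == k) (PySem.Set.ofList l) := by
    rw [List.count_eq_countP, List.countP_map]
    rfl
  rw [this, pvCountPairs]
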